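-- pv_equiv track=rewrite | github.com/diegoasanch/Programacion-I-Trabajos-Practicos | TP3 Matrices/crear_matrices.py | matrizEscalera
-- ===== SOURCE A (Python) =====
-- matrizCuad = lambda orden, filler=0: [[filler]*orden for i in range(orden)]
--
-- def secEscalera(matriz, fila, col, sec, direc):
--     '''Agrega los elementos de una matriz escalera en bajada
--
--     parametros:
--     matriz = matriz a modificar
--     fila = fila en donde comienza la secuencia
--     col = columna en donde comienza la secuencia
--     sec = valor actual de la secuencia
--     dir = direccion de la escalera -1 = baja, 1 = sube
--     '''
--
--     while fila in range(len(matriz)) and col in range(len(matriz[0])):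
--         matriz[fila][col] = sec
--         sec += 1
--         fila -= direc
--         col += direc
--
--     fila += direc
--     col -= direc
--     return fila, col, sec
--
-- def matrizEscalera(orden):
--     '''Crea una matriz con una secuencia de numeros en donde los valores
--     siguen una secuencia e incrementan siguiendo un patron de escalera
--     '''
--     matriz = matrizCuad(orden)
--
--     primer_fila = 0
--     primer_col = 0
--     sec = 1
--
--     while primer_fila < orden:
--         foo, bar, sec = secEscalera(matriz, primer_fila, primer_col, sec, -1)
--         if primer_col < len(matriz[0]) - 1:
--             primer_col += 1
--         else:
--             primer_fila += 1
--
--     return matriz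
-- ===== SOURCE B (Python) =====
-- def matrizEscalera(orden):
--     '''Crea una matriz con una secuencia de numeros en donde los valores
--     siguen una secuencia e incrementan siguiendo un patron de escalera
--     '''
--     def valor(i, j):
--         d = i + j
--         if d <= orden - 1:
--             return d * (d + 1) // 2 + i + 1
--         return orden * orden - (2 * orden - 1 - d) * (2 * orden - d) // 2 + (i - (d - orden + 1)) + 1
--     return [[valor(i, j) for j in range(orden)] for i in range(orden)]
-- ===== Notes on version B (the rewrite author's own statement) =====
-- stated objective: simpler
-- what changed: Replaces the stateful diagonal walk (mutating helper secEscalera threading a running counter through successive staircase sweeps) by a closed-form formula computing each cell independently from its anti-diagonal index, built with a list comprehension.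
import Mathlib
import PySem

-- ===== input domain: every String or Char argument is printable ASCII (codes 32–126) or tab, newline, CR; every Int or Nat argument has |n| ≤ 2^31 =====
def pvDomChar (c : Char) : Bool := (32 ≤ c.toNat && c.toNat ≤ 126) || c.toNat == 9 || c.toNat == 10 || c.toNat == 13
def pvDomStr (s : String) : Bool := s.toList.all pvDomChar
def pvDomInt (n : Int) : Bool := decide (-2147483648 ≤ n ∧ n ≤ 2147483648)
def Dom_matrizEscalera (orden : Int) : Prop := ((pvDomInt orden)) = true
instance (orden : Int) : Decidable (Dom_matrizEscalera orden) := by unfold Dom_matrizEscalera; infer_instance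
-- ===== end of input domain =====

-- B computes every cell by a closed-form formula from its anti-diagonal instead of
-- A's stateful diagonal sweeps (A mutates only its local matrix; return values proved equal).

-- ===== PORT A =====
-- matrizCuad = lambda orden, filler=0: [[filler]*orden for i in range(orden)]
def matrizCuad (orden : Int) (filler : Int) : List (List Int) :=
  (List.range orden.toNat).map (fun _ => List.replicate orden.toNat filler)

-- matriz[fila][col] = sec (functional update; A only writes at in-range indices)
def setCell (m : List (List Int)) (i j : Nat) (v : Int) : List (List Int) :=
  m.set i ((m.getD i []).set j v)

-- the while-loop of secEscalera; fuel only makes the recursion total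
def secLoop : Nat → List (List Int) → Int → Int → Int → Int →
    (List (List Int) × Int × Int × Int)
  | 0, m, fila, col, sec, _ => (m, fila, col, sec)
  | fuel + 1, m, fila, col, sec, direc =>
    if 0 ≤ fila ∧ fila < (m.length : Int) ∧ 0 ≤ col ∧ col < ((m.getD 0 []).length : Int) then
      secLoop fuel (setCell m fila.toNat col.toNat sec) (fila - direc) (col + direc) (sec + 1) direc
    else (m, fila, col, sec)

def secEscalera (m : List (List Int)) (fila col sec direc : Int) :
    (List (List Int) × Int × Int × Int) :=
  let r := secLoop (m.length + 1) m fila col sec direc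
  (r.1, r.2.1 + direc, r.2.2.1 - direc, r.2.2.2)

-- the while-loop of matrizEscalera; fuel only makes the recursion total
def outerLoop : Nat → List (List Int) → Int → Int → Int → Int → List (List Int)
  | 0, m, _, _, _, _ => m
  | fuel + 1, m, pf, pc, sec, orden =>
    if pf < orden then
      let r := secEscalera m pf pc sec (-1)
      if pc < ((r.1.getD 0 []).length : Int) - 1 then
        outerLoop fuel r.1 pf (pc + 1) r.2.2.2 orden
      else
        outerLoop fuel r.1 (pf + 1) pc r.2.2.2 orden
    else m

def matrizEscalera (orden : Int) : List (List Int) :=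
  outerLoop (2 * orden.toNat + 1) (matrizCuad orden 0) 0 0 1 orden

-- ===== PORT B =====
def cellVal (orden i j : Int) : Int :=
  let d := i + j
  if d ≤ orden - 1 then
    PySem.Int.floordiv (d * (d + 1)) 2 + i + 1
  else
    orden * orden - PySem.Int.floordiv ((2 * orden - 1 - d) * (2 * orden - d)) 2
      + (i - (d - orden + 1)) + 1

def matrizEscalera_alt (orden : Int) : List (List Int) :=
  (List.range orden.toNat).map (fun i =>
    (List.range orden.toNat).map (fun j => cellVal orden (Int.ofNat i) (Int.ofNat j)))

-- ===== PRECONDITION & SPEC =====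
def Spec_matrizEscalera (orden : Int) (out : List (List Int)) : Prop := out = matrizEscalera_alt orden
instance (orden : Int) (out : List (List Int)) : Decidable (Spec_matrizEscalera orden out) := by unfold Spec_matrizEscalera; infer_instance

-- ===== CLAIM (what is proved, stated in full; the proofs are below) =====
def Claim_equal_matrizEscalera : Prop := ∀ (orden : Int), Dom_matrizEscalera orden → Spec_matrizEscalera orden (matrizEscalera orden)

-- ===== LEMMAS AND PROOFS =====

-- canonical matrix form: n × n matrix whose (i,j) entry is F i j
def mat (n : Nat) (F : Nat → Nat → Int) : List (List Int) :=
  (List.range n).map (fun i => (List.range n).map (F i))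

-- first row touched on anti-diagonal d
def pfN (n d : Nat) : Nat := if d < n then 0 else d - (n - 1)

-- number of cells written once anti-diagonals 0 .. d-1 are done
def SN (n : Nat) : Nat → Int
  | 0 => 0
  | d + 1 => SN n d + ((min d (n - 1) + 1 - pfN n d : Nat) : Int)

-- matrix contents mid-sweep: diagonals < d full, diagonal d full for rows < i
def GF (orden : Int) (d i : Nat) (a b : Nat) : Int :=
  if a + b < d ∨ (a + b = d ∧ a < i) then cellVal orden (a : Int) (b : Int) else 0

theorem length_mat (n : Nat) (F : Nat → Nat → Int) : (mat n F).length = n := by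
  simp [mat]

theorem getD_mat (n : Nat) (F : Nat → Nat → Int) (i : Nat) (h : i < n) :
    (mat n F).getD i [] = (List.range n).map (F i) := by
  rw [List.getD_eq_getElem _ _ (by simpa [mat] using h)]
  simp [mat]

theorem mat_congr (n : Nat) (F F' : Nat → Nat → Int)
    (h : ∀ a b, a < n → b < n → F a b = F' a b) : mat n F = mat n F' := by
  apply List.ext_getElem (by simp [mat])
  intro a h1 h2
  simp only [mat, List.getElem_map, List.getElem_range]
  apply List.ext_getElem (by simp)
  intro b h3 h4
  simp only [List.getElem_map, List.getElem_range]
  exact h a b (by simpa [mat] using h1) (by simpa using h3)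

theorem setCell_mat (n : Nat) (F : Nat → Nat → Int) (i j : Nat) (v : Int) (hi : i < n) :
    setCell (mat n F) i j v =
      mat n (fun a b => if a = i ∧ b = j then v else F a b) := by
  unfold setCell
  rw [getD_mat n F i hi]
  apply List.ext_getElem (by simp [mat])
  intro a h1 h2
  rcases eq_or_ne i a with hai | hai
  · subst hai
    rw [List.getElem_set_self]
    simp only [mat, List.getElem_map, List.getElem_range]
    apply List.ext_getElem (by simp)
    intro b h3 h4
    simp only [List.getElem_map, List.getElem_range]
    rcases eq_or_ne j b with hbj | hbj
    · subst hbj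
      rw [List.getElem_set_self]
      simp
    · rw [List.getElem_set_ne hbj, List.getElem_map, List.getElem_range,
        if_neg (by tauto)]
  · rw [List.getElem_set_ne hai]
    simp only [mat, List.getElem_map, List.getElem_range]
    apply List.ext_getElem (by simp)
    intro b h3 h4
    simp only [List.getElem_map, List.getElem_range]
    rw [if_neg (by tauto)]

theorem floordiv_step (x : Int) :
    PySem.Int.floordiv (x * (x + 1)) 2 = PySem.Int.floordiv ((x - 1) * x) 2 + x := by
  rw [PySem.Int.floordiv_eq_ediv_of_pos (by norm_num : (0:Int) < 2),
      PySem.Int.floordiv_eq_ediv_of_pos (by norm_num : (0:Int) < 2)]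
  have h : x * (x + 1) = (x - 1) * x + x * 2 := by ring
  rw [h, Int.add_mul_ediv_right _ _ (by norm_num)]

theorem tri_exact (x : Int) :
    PySem.Int.floordiv ((x - 1) * x) 2 * 2 = (x - 1) * x := by
  rw [PySem.Int.floordiv_eq_ediv_of_pos (by norm_num : (0:Int) < 2)]
  apply Int.ediv_mul_cancel
  have h : Even ((x - 1) * x) := by
    have := Int.even_mul_succ_self (x - 1)
    rwa [sub_add_cancel] at this
  exact h.two_dvd

theorem SN_lo (n : Nat) (hn : 0 < n) :
    ∀ d : Nat, d ≤ n → SN n d = PySem.Int.floordiv ((d : Int) * ((d : Int) + 1)) 2 := by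
  intro d
  induction d with
  | zero => intro _; simp [SN]
  | succ d ih =>
    intro hd
    have h1 : min d (n - 1) = d := by omega
    have h2 : pfN n d = 0 := by unfold pfN; rw [if_pos (by omega)]
    have h3 := floordiv_step ((d : Int) + 1)
    have e1 : ((d : Int) + 1 - 1) * ((d : Int) + 1) = (d : Int) * ((d : Int) + 1) := by ring
    rw [e1] at h3
    simp only [SN, h1, h2, ih (by omega)]
    push_cast
    linarith [h3]

theorem SN_hi (n : Nat) (hn : 0 < n) :
    ∀ d : Nat, n ≤ d → d ≤ 2 * n - 1 →
      SN n d = (n : Int) * n -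
        PySem.Int.floordiv ((2 * (n : Int) - 1 - d) * (2 * (n : Int) - d)) 2 := by
  intro d
  induction d with
  | zero => intro h; omega
  | succ d ih =>
    intro h1 h2
    by_cases hdn : d < n
    · -- base: d + 1 = n
      have hdd : ((d : Int) + 1) = (n : Int) := by omega
      have hlo := SN_lo n hn (d + 1) (by omega)
      have hstep := floordiv_step (n : Int)
      have htri := tri_exact (n : Int)
      have e1 : (2 * (n : Int) - 1 - ((d : Nat) + 1 : Nat)) * (2 * (n : Int) - ((d : Nat) + 1 : Nat))
          = ((n : Int) - 1) * (n : Int) := by push_cast; rw [show ((d:Int)+1) = (n:Int) from hdd]; ring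
      have e2 : (((d : Nat) + 1 : Nat) : Int) * ((((d : Nat) + 1 : Nat) : Int) + 1)
          = (n : Int) * ((n : Int) + 1) := by push_cast; rw [show ((d:Int)+1) = (n:Int) from hdd]
      rw [hlo, e1, e2, hstep]
      linarith [htri]
    · have h3 : n ≤ d := by omega
      have ih' := ih h3 (by omega)
      have h1' : min d (n - 1) = n - 1 := by omega
      have h2' : pfN n d = d - (n - 1) := by unfold pfN; rw [if_neg (by omega)]
      have hstep := floordiv_step (2 * (n : Int) - 1 - d)
      have e1 : (2 * (n : Int) - 1 - (d : Int)) * ((2 * (n : Int) - 1 - (d : Int)) + 1)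
          = (2 * (n : Int) - 1 - (d : Int)) * (2 * (n : Int) - (d : Int)) := by ring
      have e2 : ((2 * (n : Int) - 1 - (d : Int)) - 1) * (2 * (n : Int) - 1 - (d : Int))
          = (2 * (n : Int) - 1 - (((d : Nat) + 1 : Nat) : Int)) * (2 * (n : Int) - (((d : Nat) + 1 : Nat) : Int)) := by
        push_cast; ring
      rw [e1, e2] at hstep
      have hc : ((min d (n - 1) + 1 - pfN n d : Nat) : Int) = 2 * (n : Int) - 1 - (d : Int) := by
        rw [h1', h2']; omega
      simp only [SN, ih', hc]
      linarith [hstep]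

-- the running counter equals the closed form at every written cell
theorem cellVal_key (orden : Int) (n d i : Nat) (hor : orden = (n : Int)) (hn : 0 < n)
    (hge : pfN n d ≤ i) (hle : i ≤ min d (n - 1)) :
    cellVal orden (i : Int) ((d : Int) - (i : Int)) =
      SN n d + ((i : Int) - ((pfN n d : Nat) : Int)) + 1 := by
  subst hor
  unfold cellVal
  have hij : (i : Int) + ((d : Int) - (i : Int)) = (d : Int) := by ring
  by_cases hdn : d < n
  · have hpf : pfN n d = 0 := by unfold pfN; rw [if_pos hdn]
    rw [SN_lo n hn d (by omega)]
    simp only [hij, hpf]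
    rw [if_pos (by omega)]
    push_cast
    ring
  · have hpf : pfN n d = d - (n - 1) := by unfold pfN; rw [if_neg hdn]
    rw [SN_hi n hn d (by omega) (by omega)]
    simp only [hij, hpf]
    rw [if_neg (by omega)]
    have hc : ((d - (n - 1) : Nat) : Int) = (d : Int) - (n : Int) + 1 := by omega
    rw [hc]

-- inner loop: one diagonal sweep fills diagonal d and advances the counter
theorem inner_lemma (orden : Int) (n d : Nat) (hor : orden = (n : Int)) (hn : 0 < n) :
    ∀ (fuel i : Nat), pfN n d ≤ i → i ≤ min d (n - 1) + 1 → min d (n - 1) + 1 - i < fuel →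
      secLoop fuel (mat n (GF orden d i)) (i : Int) ((d : Int) - (i : Int))
          (SN n d + ((i : Int) - ((pfN n d : Nat) : Int)) + 1) (-1)
        = (mat n (GF orden d (min d (n - 1) + 1)),
           ((min d (n - 1) + 1 : Nat) : Int),
           (d : Int) - ((min d (n - 1) + 1 : Nat) : Int),
           SN n (d + 1) + 1) := by
  intro fuel
  induction fuel with
  | zero => intro i _ _ h; omega
  | succ fuel ih =>
    intro i hge hle hfuel
    have hpfd : d ≤ pfN n d + (n - 1) ∧ pfN n d ≤ d ∧ (d < n → pfN n d = 0) := by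
      unfold pfN; split <;> omega
    rw [secLoop]
    by_cases hcase : i ≤ min d (n - 1)
    · rw [if_pos ?_]
      · have hilt : i < n := by omega
        have hto1 : ((i : Int)).toNat = i := by omega
        have hto2 : ((d : Int) - (i : Int)).toNat = d - i := by omega
        rw [hto1, hto2, setCell_mat n _ i (d - i) _ hilt]
        have hmeq : mat n (fun a b => if a = i ∧ b = d - i then
              SN n d + ((i : Int) - ((pfN n d : Nat) : Int)) + 1 else GF orden d i a b)
            = mat n (GF orden d (i + 1)) := by
          apply mat_congr
          intro a b ha hb
          by_cases hab : a = i ∧ b = d - i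
          · rw [if_pos hab]
            obtain ⟨ha1, hb1⟩ := hab
            unfold GF
            rw [if_pos (Or.inr ⟨by omega, by omega⟩)]
            have hc : ((b : Nat) : Int) = (d : Int) - (i : Int) := by omega
            rw [ha1, hc, cellVal_key orden n d i hor hn hge hcase]
          · rw [if_neg hab]
            unfold GF
            have : (a + b < d ∨ (a + b = d ∧ a < i)) ↔ (a + b < d ∨ (a + b = d ∧ a < i + 1)) := by
              constructor
              · rintro (h | ⟨h1, h2⟩); · exact Or.inl h
                exact Or.inr ⟨h1, by omega⟩
              · rintro (h | ⟨h1, h2⟩); · exact Or.inl h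
                rcases Nat.lt_or_ge a i with h3 | h3
                · exact Or.inr ⟨h1, h3⟩
                · exfalso; exact hab ⟨by omega, by omega⟩
            by_cases hc : a + b < d ∨ (a + b = d ∧ a < i)
            · rw [if_pos hc, if_pos (this.mp hc)]
            · rw [if_neg hc, if_neg (fun h => hc (this.mpr h))]
        rw [hmeq]
        have e1 : (i : Int) - (-1) = ((i + 1 : Nat) : Int) := by push_cast; ring
        have e2 : (d : Int) - (i : Int) + (-1) = (d : Int) - ((i + 1 : Nat) : Int) := by push_cast; ring
        have e3 : SN n d + ((i : Int) - ((pfN n d : Nat) : Int)) + 1 + 1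
            = SN n d + (((i + 1 : Nat) : Int) - ((pfN n d : Nat) : Int)) + 1 := by push_cast; ring
        rw [e1, e2, e3]
        exact ih (i + 1) (by omega) (by omega) (by omega)
      · refine ⟨by positivity, ?_, by omega, ?_⟩
        · rw [length_mat]; omega
        · rw [getD_mat n _ 0 hn]
          simp only [List.length_map, List.length_range]
          omega
    · have hieq : i = min d (n - 1) + 1 := by omega
      subst hieq
      rw [if_neg ?_]
      · have hsec : SN n d + (((min d (n - 1) + 1 : Nat) : Int) - ((pfN n d : Nat) : Int)) + 1
            = SN n (d + 1) + 1 := by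
          show _ = SN n d + ((min d (n - 1) + 1 - pfN n d : Nat) : Int) + 1
          have hp : pfN n d ≤ min d (n - 1) + 1 := by omega
          rw [Nat.cast_sub hp]
        rw [hsec]
      · rw [length_mat, getD_mat n _ 0 hn]
        simp only [List.length_map, List.length_range]
        intro ⟨c1, c2, c3, c4⟩
        unfold pfN at hge
        by_cases hdn : d < n
        · rw [if_pos hdn] at hge
          have : min d (n - 1) = d ∨ min d (n - 1) = n - 1 := by omega
          omega
        · rw [if_neg hdn] at hge
          omega

theorem outer_lemma (orden : Int) (n : Nat) (hor : orden = (n : Int)) (hn : 0 < n) :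
    ∀ (fuel d : Nat), d ≤ 2 * n - 1 → 2 * n - 1 - d < fuel →
      outerLoop fuel (mat n (GF orden d (pfN n d))) ((pfN n d : Nat) : Int)
          ((min d (n - 1) : Nat) : Int) (SN n d + 1) orden
        = mat n (GF orden (2 * n - 1) (pfN n (2 * n - 1))) := by
  intro fuel
  induction fuel with
  | zero => intro d _ h; omega
  | succ fuel ih =>
    intro d hd hfuel
    rw [outerLoop]
    by_cases hlast : d = 2 * n - 1
    · subst hlast
      rw [if_neg ?_]
      unfold pfN
      rw [if_neg (by omega)]
      have : ((2 * n - 1 - (n - 1) : Nat) : Int) = (n : Int) := by omega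
      rw [this, hor]
      omega
    · have hd2 : d ≤ 2 * n - 2 := by omega
      rw [if_pos ?_]
      · -- run the diagonal sweep
        have hpc : ((min d (n - 1) : Nat) : Int) = (d : Int) - ((pfN n d : Nat) : Int) := by
          unfold pfN
          by_cases hdn : d < n
          · rw [if_pos hdn]; push_cast; omega
          · rw [if_neg hdn]; push_cast; omega
        have hsec0 : SN n d + 1
            = SN n d + (((pfN n d : Nat) : Int) - ((pfN n d : Nat) : Int)) + 1 := by ring
        unfold secEscalera
        rw [length_mat]
        have hin := inner_lemma orden n d hor hn (n + 1) (pfN n d) (le_refl _)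
          (by unfold pfN; split <;> omega) (by unfold pfN; split <;> omega)
        rw [hpc, hsec0, hin]
        have hmeq : mat n (GF orden d (min d (n - 1) + 1)) = mat n (GF orden (d + 1) (pfN n (d + 1))) := by
          apply mat_congr
          intro a b ha hb
          unfold GF
          have hiff : (a + b < d ∨ (a + b = d ∧ a < min d (n - 1) + 1)) ↔
              (a + b < d + 1 ∨ (a + b = d + 1 ∧ a < pfN n (d + 1))) := by
            unfold pfN; split <;> omega
          by_cases hc : a + b < d ∨ (a + b = d ∧ a < min d (n - 1) + 1)
          · rw [if_pos hc, if_pos (hiff.mp hc)]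
          · rw [if_neg hc, if_neg (fun h => hc (hiff.mpr h))]
        rw [hmeq]
        dsimp only
        rw [getD_mat n _ 0 hn]
        simp only [List.length_map, List.length_range]
        rw [← hpc]
        by_cases hbr : ((min d (n - 1) : Nat) : Int) < (n : Int) - 1
        · rw [if_pos hbr]
          have hds : d < n - 1 := by push_cast at hbr; omega
          have e1 : ((pfN n d : Nat) : Int) = ((pfN n (d + 1) : Nat) : Int) := by
            unfold pfN; rw [if_pos (by omega), if_pos (by omega)]
          have e2 : ((min d (n - 1) : Nat) : Int) + 1 = ((min (d + 1) (n - 1) : Nat) : Int) := by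
            push_cast; omega
          rw [e1, e2]
          exact ih (d + 1) (by omega) (by omega)
        · rw [if_neg hbr]
          have hds : n - 1 ≤ d := by push_cast at hbr; omega
          have e1 : ((pfN n d : Nat) : Int) + 1 = ((pfN n (d + 1) : Nat) : Int) := by
            unfold pfN
            by_cases hdn : d < n
            · rw [if_pos hdn, if_neg (by omega)]; push_cast; omega
            · rw [if_neg hdn, if_neg (by omega)]; omega
          have e2 : ((min d (n - 1) : Nat) : Int) = ((min (d + 1) (n - 1) : Nat) : Int) := by
            push_cast; omega
          rw [e1, e2]
          exact ih (d + 1) (by omega) (by omega)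
      · rw [hor]
        unfold pfN
        split <;> (push_cast; omega)

theorem matrizEscalera_spec' (orden : Int) :
    matrizEscalera orden = matrizEscalera_alt orden := by
  by_cases hpos : 0 < orden
  · set n := orden.toNat with hn
    have hor : orden = (n : Int) := by omega
    have hn0 : 0 < n := by omega
    have hcuad : matrizCuad orden 0 = mat n (GF orden 0 (pfN n 0)) := by
      unfold matrizCuad
      rw [← hn]
      apply List.ext_getElem (by simp [mat])
      intro a h1 h2
      simp only [List.getElem_map, List.getElem_range, mat]
      apply List.ext_getElem (by simp)
      intro b h3 h4
      simp only [List.getElem_range, List.getElem_map, List.getElem_replicate]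
      unfold GF
      have hp0 : pfN n 0 = 0 := by unfold pfN; rw [if_pos hn0]
      rw [hp0, if_neg (by omega)]
    have h0pf : ((pfN n 0 : Nat) : Int) = 0 := by unfold pfN; rw [if_pos hn0]; simp
    have h0pc : ((min 0 (n - 1) : Nat) : Int) = 0 := by simp
    have h0s : SN n 0 + 1 = 1 := by simp [SN]
    have hout := outer_lemma orden n hor hn0 (2 * n + 1) 0 (by omega) (by omega)
    rw [h0pf, h0pc, h0s] at hout
    unfold matrizEscalera
    rw [hcuad, ← hn, hout]
    have halt : matrizEscalera_alt orden = mat n (fun a b => cellVal orden (a : Int) (b : Int)) := by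
      unfold matrizEscalera_alt mat
      rw [← hn]
      simp only [Int.ofNat_eq_natCast]
    rw [halt]
    apply mat_congr
    intro a b ha hb
    unfold GF
    rw [if_pos (Or.inl (by omega))]
  · have h0 : orden.toNat = 0 := by omega
    unfold matrizEscalera matrizCuad matrizEscalera_alt
    rw [h0]
    simp only [List.range_zero, List.map_nil, Nat.mul_zero, Nat.zero_add]
    rw [outerLoop]
    rw [if_neg (by omega)]

-- ===== VERDICT (by name: the statement is the Claim_ definition above) =====
theorem matrizEscalera_spec : Claim_equal_matrizEscalera := by
  intro orden _
  exact matrizEscalera_spec' orden
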